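-- pv_equiv track=rewrite | github.com/JSebastianIEU/tik-tok-recommendation-system | scripts/run_live_e2e_validation.py | build_validation_request_plan
-- ===== SOURCE A (Python) =====
-- from typing import Any, Dict, List, Optional, Tuple
--
-- RUNTIME_OBJECTIVES = ("reach", "engagement", "conversion")
--
-- EXPERIMENT_VARIANTS = ("control", "treatment")
--
-- def build_validation_request_plan(request_count: int) -> List[Dict[str, str]]:
--     total = max(1, int(request_count))
--     plan: List[Dict[str, str]] = []
--     for idx in range(total):
--         objective = RUNTIME_OBJECTIVES[(idx // len(EXPERIMENT_VARIANTS)) % len(RUNTIME_OBJECTIVES)]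
--         variant = EXPERIMENT_VARIANTS[idx % len(EXPERIMENT_VARIANTS)]
--         plan.append(
--             {
--                 "objective": str(objective),
--                 "force_variant": str(variant),
--             }
--         )
--     return plan
-- ===== SOURCE B (Python) =====
-- from typing import Any, Dict, List, Optional, Tuple
--
-- RUNTIME_OBJECTIVES = ("reach", "engagement", "conversion")
--
-- EXPERIMENT_VARIANTS = ("control", "treatment")
--
-- def build_validation_request_plan(request_count: int) -> List[Dict[str, str]]:
--     # Precompute the 6-element repeating pattern once (product order matches
--     # A's idx//2 / idx%2 modular indexing), replicate it enough times, and
--     # take a prefix -- no per-index arithmetic.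
--     pattern = [(o, v) for o in RUNTIME_OBJECTIVES for v in EXPERIMENT_VARIANTS]
--     total = max(1, int(request_count))
--     reps = total // len(pattern) + 1
--     return [{"objective": o, "force_variant": v} for o, v in (pattern * reps)[:total]]
-- ===== Notes on version B (the rewrite author's own statement) =====
-- stated objective: idiomatic
-- what changed: B precomputes the objective/variant cycle once as a product comprehension, replicates it and slices a prefix, instead of recomputing per-index floor-division and modulo tuple indices for every element.
import Mathlib
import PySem

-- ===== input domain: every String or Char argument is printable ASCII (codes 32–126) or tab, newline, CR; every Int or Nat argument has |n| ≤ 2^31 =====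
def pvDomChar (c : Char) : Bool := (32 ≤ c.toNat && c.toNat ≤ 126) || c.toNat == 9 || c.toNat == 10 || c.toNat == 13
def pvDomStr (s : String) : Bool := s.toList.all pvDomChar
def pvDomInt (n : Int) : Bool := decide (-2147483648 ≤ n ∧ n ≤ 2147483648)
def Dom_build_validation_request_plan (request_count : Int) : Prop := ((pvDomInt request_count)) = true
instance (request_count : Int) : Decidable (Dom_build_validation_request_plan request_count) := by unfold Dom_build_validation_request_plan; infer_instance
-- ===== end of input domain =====

-- B replaces A's per-index modular tuple indexing by one precomputed 6-entry
-- cycle replicated and prefix-sliced (objective: idiomatic; same O(n) cost).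

-- ===== PORT A =====
-- A: per-index loop; tuple indices (idx//2)%3 and idx%2 are always in range,
-- so pyGetD's default "" is never returned.
def build_validation_request_plan (request_count : Int) : List (List (String × String)) :=
  let objs : List String := ["reach", "engagement", "conversion"]
  let vars : List String := ["control", "treatment"]
  let total : Int := max 1 request_count
  (PySem.List.pyRange 0 total 1).foldl
    (fun plan idx =>
      let objective :=
        PySem.List.pyGetD objs
          (PySem.Int.mod (PySem.Int.floordiv idx (vars.length : Int)) (objs.length : Int)) ""
      let variant := PySem.List.pyGetD vars (PySem.Int.mod idx (vars.length : Int)) ""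
      plan ++ [[("objective", objective), ("force_variant", variant)]]) []

-- ===== PORT B =====
-- B: product comprehension -> pattern; pattern * reps; slice [:total]; build dicts.
def build_validation_request_plan_alt (request_count : Int) : List (List (String × String)) :=
  let pattern : List (String × String) :=
    (["reach", "engagement", "conversion"] : List String).flatMap
      (fun o => (["control", "treatment"] : List String).map (fun v => (o, v)))
  let total : Int := max 1 request_count
  let reps : Int := PySem.Int.floordiv total (pattern.length : Int) + 1
  (PySem.List.slice (List.flatten (List.replicate reps.toNat pattern)) none (some total)).map
    (fun p => [("objective", p.1), ("force_variant", p.2)])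

-- ===== PRECONDITION & SPEC =====
def Spec_build_validation_request_plan (request_count : Int) (out : List (List (String × String))) : Prop := out = build_validation_request_plan_alt request_count
instance (request_count : Int) (out : List (List (String × String))) : Decidable (Spec_build_validation_request_plan request_count out) := by unfold Spec_build_validation_request_plan; infer_instance

-- ===== CLAIM (what is proved, stated in full; the proofs are below) =====
def Claim_equal_build_validation_request_plan : Prop := ∀ (request_count : Int), Dom_build_validation_request_plan request_count → Spec_build_validation_request_plan request_count (build_validation_request_plan request_count)

-- ===== LEMMAS AND PROOFS =====

-- The 6-entry cycle, as dict rows, and the common "row at index i" function.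
def pvBase : List (List (String × String)) :=
  [[("objective", "reach"), ("force_variant", "control")],
   [("objective", "reach"), ("force_variant", "treatment")],
   [("objective", "engagement"), ("force_variant", "control")],
   [("objective", "engagement"), ("force_variant", "treatment")],
   [("objective", "conversion"), ("force_variant", "control")],
   [("objective", "conversion"), ("force_variant", "treatment")]]

def pvRow (i : Nat) : List (String × String) := pvBase.getD (i % 6) []

theorem pvRow_add_six (i : Nat) : pvRow (6 + i) = pvRow i := by
  simp [pvRow, Nat.add_mod_left]

theorem pvBase_map_range : (List.range 6).map pvRow = pvBase := by decide

-- A's loop body at a nonnegative index is pvRow.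
theorem pvA_body (k : Nat) :
    [(("objective" : String),
        PySem.List.pyGetD ["reach", "engagement", "conversion"]
          (PySem.Int.mod (PySem.Int.floordiv (k : Int) 2) 3) ""),
      (("force_variant" : String),
        PySem.List.pyGetD ["control", "treatment"] (PySem.Int.mod (k : Int) 2) "")]
      = pvRow k := by
  have h2 : PySem.Int.floordiv (k : Int) 2 = ((k / 2 : Nat) : Int) :=
    PySem.Int.floordiv_natCast k 2
  have h3 : PySem.Int.mod ((k / 2 : Nat) : Int) 3 = ((k / 2 % 3 : Nat) : Int) :=
    PySem.Int.mod_natCast (k / 2) 3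
  have h4 : PySem.Int.mod (k : Int) 2 = ((k % 2 : Nat) : Int) :=
    PySem.Int.mod_natCast k 2
  rw [h2, h3, h4, PySem.List.pyGetD_natCast, PySem.List.pyGetD_natCast]
  have hr : k % 6 < 6 := Nat.mod_lt _ (by omega)
  have hd : k / 2 % 3 = (k % 6) / 2 := by omega
  have hm : k % 2 = (k % 6) % 2 := by omega
  rw [hd, hm, pvRow]
  interval_cases h : k % 6 <;> rfl

-- A equals the range-map of pvRow.
theorem pvA_eq (rc : Int) :
    build_validation_request_plan rc = (List.range (max 1 rc).toNat).map pvRow := by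
  show (PySem.List.pyRange 0 (max 1 rc) 1).foldl
      (fun plan idx =>
        plan ++ [[("objective",
          PySem.List.pyGetD ["reach", "engagement", "conversion"]
            (PySem.Int.mod (PySem.Int.floordiv idx 2) 3) ""),
          ("force_variant",
          PySem.List.pyGetD ["control", "treatment"] (PySem.Int.mod idx 2) "")]]) []
      = _
  rw [PySem.List.foldl_append_singleton_eq_map, PySem.List.pyRange_one]
  simp only [List.map_map, List.nil_append, sub_zero]
  refine List.map_congr_left ?_
  intro k _
  simpa using pvA_body k

-- Prefix of the replicated cycle is the range-map of pvRow.
theorem pvTake_flatten : ∀ (m n : Nat), n ≤ 6 * m →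
    (List.flatten (List.replicate m pvBase)).take n = (List.range n).map pvRow := by
  intro m
  induction m with
  | zero => intro n hn; interval_cases n; simp
  | succ m ih =>
    intro n hn
    rw [List.replicate_succ, List.flatten_cons, List.take_append]
    by_cases h6 : n ≤ 6
    · have : n - pvBase.length = 0 := by simp [pvBase]; omega
      rw [this, List.take_zero, List.append_nil]
      interval_cases n <;> rfl
    · have hlen : n - pvBase.length = n - 6 := by simp [pvBase]
      have htk : pvBase.take n = pvBase := List.take_of_length_le (by simp [pvBase]; omega)
      rw [hlen, htk, ih (n - 6) (by omega)]
      have key : (List.range n).map pvRow = pvBase ++ (List.range (n - 6)).map pvRow := by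
        conv_lhs => rw [show n = 6 + (n - 6) by omega]
        rw [List.range_add, List.map_append, List.map_map, pvBase_map_range]
        congr 1
        refine List.map_congr_left ?_
        intro i _
        simp [Function.comp, pvRow_add_six]
      rw [key]

-- B equals the range-map of pvRow.
theorem pvB_eq (rc : Int) :
    build_validation_request_plan_alt rc = (List.range (max 1 rc).toNat).map pvRow := by
  have htot : (0 : Int) ≤ max 1 rc := by omega
  have hp : (["reach", "engagement", "conversion"] : List String).flatMap
      (fun o => (["control", "treatment"] : List String).map (fun v => (o, v)))
      = ([("reach", "control"), ("reach", "treatment"), ("engagement", "control"),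
          ("engagement", "treatment"), ("conversion", "control"), ("conversion", "treatment")]
          : List (String × String)) := rfl
  show (PySem.List.slice
        (List.flatten (List.replicate
          (PySem.Int.floordiv (max 1 rc)
            (((["reach", "engagement", "conversion"] : List String).flatMap
              (fun o => (["control", "treatment"] : List String).map (fun v => (o, v)))).length : Int)
            + 1).toNat
          ((["reach", "engagement", "conversion"] : List String).flatMap
            (fun o => (["control", "treatment"] : List String).map (fun v => (o, v))))))
        none (some (max 1 rc))).map
      (fun p => [("objective", p.1), ("force_variant", p.2)]) = _
  rw [hp, PySem.List.slice_to _ htot, List.map_take, List.map_flatten, List.map_replicate]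
  set t : Int := max 1 rc with ht
  have hmap : (([("reach", "control"), ("reach", "treatment"), ("engagement", "control"),
      ("engagement", "treatment"), ("conversion", "control"), ("conversion", "treatment")]
      : List (String × String)).map (fun p => [("objective", p.1), ("force_variant", p.2)]))
      = pvBase := rfl
  rw [hmap, pvTake_flatten]
  have hfd : PySem.Int.floordiv t (6 : Int) = t / 6 := PySem.Int.floordiv_eq_ediv_of_pos (by omega)
  have h1 : (1 : Int) ≤ t := by omega
  have hlen : ((([("reach", "control"), ("reach", "treatment"), ("engagement", "control"),
      ("engagement", "treatment"), ("conversion", "control"), ("conversion", "treatment")]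
      : List (String × String)).length : Int)) = 6 := rfl
  rw [hlen, hfd]
  omega

-- ===== VERDICT (by name: the statement is the Claim_ definition above) =====
theorem build_validation_request_plan_spec : Claim_equal_build_validation_request_plan := by
  intro rc _
  unfold Spec_build_validation_request_plan
  rw [pvA_eq, pvB_eq]
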